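-- pv_equiv track=rewrite | github.com/thealper2/codewars-solutions | 7-kyu/walking_in_the_hallway.py | contact
-- ===== SOURCE A (Python) =====
-- def contact(hallway):
--     n = len(hallway)
--     min_steps = float('inf')
--     for i in range(n):
--         if hallway[i] == '>':
--             for j in range(i + 1, n):
--                 if hallway[j] == '<':
--                     steps = (j - i + 1) // 2
--                     if steps < min_steps:
--                         min_steps = steps
--
--     if min_steps != float('inf'):
--         return min_steps
--
--     return -1
-- ===== SOURCE B (Python) =====
-- def contact(hallway):
--     last = None
--     best = None
--     for j, c in enumerate(hallway):
--         if c == '>':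
--             last = j
--         elif c == '<':
--             if last is not None:
--                 steps = (j - last + 1) // 2
--                 if best is None or steps < best:
--                     best = steps
--     return best if best is not None else -1
-- ===== Notes on version B (the rewrite author's own statement) =====
-- stated objective: alternative
-- what changed: Replaced the nested scan over all right-arrow/left-arrow pairs by a single left-to-right pass that remembers the index of the most recent right-arrow and evaluates the gap only at each left-arrow (the closest right-arrow minimizes the step count).
import Mathlib
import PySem

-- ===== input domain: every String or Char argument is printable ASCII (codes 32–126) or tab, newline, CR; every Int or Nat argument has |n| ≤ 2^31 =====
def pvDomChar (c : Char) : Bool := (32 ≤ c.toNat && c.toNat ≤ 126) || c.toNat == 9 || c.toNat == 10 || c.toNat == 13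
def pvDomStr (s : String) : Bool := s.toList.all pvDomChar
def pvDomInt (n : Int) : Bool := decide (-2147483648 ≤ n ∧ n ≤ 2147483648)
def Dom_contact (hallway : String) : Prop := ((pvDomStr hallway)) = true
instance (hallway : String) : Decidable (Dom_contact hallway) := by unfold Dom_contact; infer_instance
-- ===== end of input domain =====

-- B replaces A's nested scan over all right-arrow/left-arrow pairs by one left-to-right pass
-- that remembers the last right-arrow index and evaluates the gap at each left-arrow (alternative algorithm).


-- ===== PORT A =====
def contact (hallway : String) : Int :=
  let cs := hallway.toList
  let n : Int := cs.length
  let min_steps : Option Int :=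
    (PySem.List.pyRange 0 n 1).foldl (fun ms i =>
      if PySem.List.pyGet? cs i = some '>' then
        (PySem.List.pyRange (i + 1) n 1).foldl (fun ms j =>
          if PySem.List.pyGet? cs j = some '<' then
            let steps := PySem.Int.floordiv (j - i + 1) 2
            match ms with
            | none => some steps
            | some m => if steps < m then some steps else some m
          else ms) ms
      else ms) none
  match min_steps with
  | some m => m
  | none => -1

-- ===== PORT B =====
-- the loop body of B: state = (index of last '>' seen, best step count so far)
def stepB (st : Option Int × Option Int) (jc : Int × Char) : Option Int × Option Int :=
  let last := st.1
  let best := st.2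
  if jc.2 = '>' then (some jc.1, best)
  else if jc.2 = '<' then
    match last with
    | some i =>
      let steps := PySem.Int.floordiv (jc.1 - i + 1) 2
      match best with
      | none => (last, some steps)
      | some b => if steps < b then (last, some steps) else (last, some b)
    | none => st
  else st

def contact_alt (hallway : String) : Int :=
  let st : Option Int × Option Int :=
    (PySem.List.enumerate hallway.toList 0).foldl stepB (none, none)
  match st.2 with
  | some m => m
  | none => -1

-- ===== PRECONDITION & SPEC =====
def Spec_contact (hallway : String) (out : Int) : Prop := out = contact_alt hallway
instance (hallway : String) (out : Int) : Decidable (Spec_contact hallway out) := by unfold Spec_contact; infer_instance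

-- ===== CLAIM (what is proved, stated in full; the proofs are below) =====
def Claim_equal_contact : Prop := ∀ (hallway : String), Dom_contact hallway → Spec_contact hallway (contact hallway)

-- ===== LEMMAS AND PROOFS =====

-- accumulator update shared by both ports ("min with None = infinity")
def omin (ms : Option Int) (s : Int) : Option Int :=
  match ms with
  | none => some s
  | some m => if s < m then some s else some m

-- the list of candidate step counts A's nested loop ranges over (absolute indices)
def listA (cs : List Char) : List Int :=
  (List.range cs.length).flatMap (fun i =>
    if cs[i]? = some '>' then
      ((List.range (cs.length - (i + 1))).filter (fun k => decide (cs[i + 1 + k]? = some '<'))).map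
        (fun k => (((k + 2) / 2 : Nat) : Int))
    else [])

-- B's candidate steps: g = distance walked since the last '>' (none = no '>' yet)
def gapB : Option Nat → List Char → List Int
  | _, [] => []
  | g, c :: cs =>
    if c = '>' then gapB (some 1) cs
    else if c = '<' then
      match g with
      | some d => (((d + 1) / 2 : Nat) : Int) :: gapB (some (d + 1)) cs
      | none => gapB none cs
    else gapB (Option.map (· + 1) g) cs

theorem omin_eq_min (m s : Int) : omin (some m) s = some (min m s) := by
  show (if s < m then some s else some m) = some (min m s)
  split_ifs with h
  · rw [min_eq_right (le_of_lt h)]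
  · rw [min_eq_left (by omega)]

theorem foldl_omin_some (l : List Int) (m : Int) :
    l.foldl omin (some m) = some (l.foldl min m) := by
  induction l generalizing m with
  | nil => rfl
  | cons a l ih => simp [List.foldl, omin_eq_min, ih]

theorem foldl_omin_none (l : List Int) : l.foldl omin none = l.min? := by
  cases l with
  | nil => rfl
  | cons a l => rw [List.min?_cons']; simp [List.foldl, omin, foldl_omin_some]

theorem foldl_filter_omin {α : Type} (l : List α) (p : α → Bool) (F : α → Int) (ms : Option Int) :
    l.foldl (fun ms j => if p j then omin ms (F j) else ms) ms
      = ((l.filter p).map F).foldl omin ms := by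
  induction l generalizing ms with
  | nil => rfl
  | cons a l ih => by_cases h : p a <;> simp [List.foldl, h, ih]

theorem foldl_flat_omin {α : Type} (l : List α) (G : α → List Int) (ms : Option Int) :
    l.foldl (fun ms i => (G i).foldl omin ms) ms = (l.flatMap G).foldl omin ms := by
  induction l generalizing ms with
  | nil => rfl
  | cons a l ih => simp [List.foldl, List.flatMap_cons, List.foldl_append, ih]

-- reduction equations for gapB
theorem gapB_gt (g : Option Nat) (cs : List Char) : gapB g ('>' :: cs) = gapB (some 1) cs := by
  simp [gapB]

theorem gapB_lt_some (d : Nat) (cs : List Char) :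
    gapB (some d) ('<' :: cs) = (((d + 1) / 2 : Nat) : Int) :: gapB (some (d + 1)) cs := by
  simp [gapB]

theorem gapB_lt_none (cs : List Char) : gapB none ('<' :: cs) = gapB none cs := by
  simp [gapB]

theorem gapB_other (g : Option Nat) (cs : List Char) (c : Char) (h1 : c ≠ '>') (h2 : c ≠ '<') :
    gapB g (c :: cs) = gapB (Option.map (· + 1) g) cs := by
  simp only [gapB]
  rw [if_neg h1, if_neg h2]

theorem cast_div2_mono {a b : Nat} (h : a ≤ b) : ((a / 2 : Nat) : Int) ≤ ((b / 2 : Nat) : Int) := by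
  exact_mod_cast Nat.div_le_div_right h

-- A's nested loop is the omin-fold of listA
theorem A_fold (cs : List Char) :
    (PySem.List.pyRange 0 (cs.length : Int) 1).foldl
      (fun ms i =>
        if PySem.List.pyGet? cs i = some '>' then
          (PySem.List.pyRange (i + 1) (cs.length : Int) 1).foldl
            (fun ms j =>
              if PySem.List.pyGet? cs j = some '<' then
                let steps := PySem.Int.floordiv (j - i + 1) 2
                match ms with
                | none => some steps
                | some m => if steps < m then some steps else some m
              else ms) ms
        else ms) (none : Option Int)
    = (listA cs).foldl omin none := by
  rw [listA, ← foldl_flat_omin, PySem.List.pyRange_one]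
  rw [show ((cs.length : Int) - 0).toNat = cs.length by omega, List.foldl_map]
  apply PySem.List.foldl_congr_mem
  intro ms i hi
  rw [List.mem_range] at hi
  simp only [zero_add, PySem.List.pyGet?_natCast]
  by_cases hgt : cs[i]? = some '>'
  · rw [if_pos hgt, if_pos hgt, ← foldl_filter_omin, PySem.List.pyRange_one]
    rw [show ((cs.length : Int) - ((i : Int) + 1)).toNat = cs.length - (i + 1) by omega,
        List.foldl_map]
    apply PySem.List.foldl_congr_mem
    intro acc k hk
    rw [show (i : Int) + 1 + (k : Int) = ((i + 1 + k : Nat) : Int) by push_cast; ring,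
        PySem.List.pyGet?_natCast]
    simp only [decide_eq_true_eq]
    by_cases hlt : cs[i + 1 + k]? = some '<'
    · have hfd : PySem.Int.floordiv (((i + 1 + k : Nat) : Int) - (i : Int) + 1) 2
          = (((k + 2) / 2 : Nat) : Int) := by
        rw [show ((i + 1 + k : Nat) : Int) - (i : Int) + 1 = ((k + 2 : Nat) : Int) by push_cast; ring]
        exact_mod_cast PySem.Int.floordiv_natCast (k + 2) 2
      rw [if_pos hlt, if_pos hlt, hfd]
      rfl
    · rw [if_neg hlt, if_neg hlt]
  · rw [if_neg hgt, if_neg hgt]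
    rfl

-- stepB reduction equations
theorem stepB_gt (l b : Option Int) (k : Int) : stepB (l, b) (k, '>') = (some k, b) := rfl

theorem stepB_lt_some (i : Int) (b : Option Int) (k : Int) :
    stepB (some i, b) (k, '<') = (some i, omin b (PySem.Int.floordiv (k - i + 1) 2)) := by
  cases b with
  | none => rfl
  | some b =>
    show (if PySem.Int.floordiv (k - i + 1) 2 < b then _ else _) = _
    simp only [omin]
    split_ifs <;> rfl

theorem stepB_lt_none (b : Option Int) (k : Int) : stepB (none, b) (k, '<') = (none, b) := rfl

theorem stepB_other (l b : Option Int) (k : Int) (c : Char) (h1 : c ≠ '>') (h2 : c ≠ '<') :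
    stepB (l, b) (k, c) = (l, b) := by
  simp only [stepB]
  rw [if_neg h1, if_neg h2]

-- B's single pass is the omin-fold of gapB
theorem B_fold (cs : List Char) (k : Int) (g : Option Nat) (last best : Option Int)
    (hrel : (g = none ∧ last = none) ∨ (∃ d : Nat, g = some d ∧ last = some (k - d))) :
    ((PySem.List.enumerate cs k).foldl stepB (last, best)).2
    = (gapB g cs).foldl omin best := by
  induction cs generalizing k g last best with
  | nil => rw [PySem.List.enumerate_nil]; rfl
  | cons c cs ih =>
    rw [PySem.List.enumerate_cons, List.foldl_cons]
    by_cases hgt : c = '>'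
    · subst hgt
      rw [gapB_gt, stepB_gt]
      exact ih (k + 1) (some 1) (some k) best (Or.inr ⟨1, rfl, by push_cast; ring_nf⟩)
    · by_cases hlt : c = '<'
      · subst hlt
        rcases hrel with ⟨hg, hl⟩ | ⟨d, hg, hl⟩
        · subst hg; subst hl
          rw [gapB_lt_none, stepB_lt_none]
          exact ih (k + 1) none none best (Or.inl ⟨rfl, rfl⟩)
        · subst hg; subst hl
          have hfd : PySem.Int.floordiv (k - (k - (d : Nat)) + 1) 2 = (((d + 1) / 2 : Nat) : Int) := by
            rw [show k - (k - (d : Nat)) + 1 = ((d + 1 : Nat) : Int) by push_cast; ring]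
            exact_mod_cast PySem.Int.floordiv_natCast (d + 1) 2
          rw [stepB_lt_some, gapB_lt_some, List.foldl_cons, hfd]
          exact ih (k + 1) (some (d + 1)) (some (k - (d : Nat)))
            (omin best (((d + 1) / 2 : Nat) : Int))
            (Or.inr ⟨d + 1, rfl, by push_cast; ring_nf⟩)
      · rw [gapB_other g cs c hgt hlt]
        rcases hrel with ⟨hg, hl⟩ | ⟨d, hg, hl⟩
        · subst hg; subst hl
          rw [stepB_other _ _ _ _ hgt hlt]
          exact ih (k + 1) none none best (Or.inl ⟨rfl, rfl⟩)
        · subst hg; subst hl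
          rw [stepB_other _ _ _ _ hgt hlt]
          exact ih (k + 1) (some (d + 1)) (some (k - (d : Nat))) best
            (Or.inr ⟨d + 1, rfl, by push_cast; ring_nf⟩)

theorem mem_listA {cs : List Char} {x : Int} :
    x ∈ listA cs ↔ ∃ i j, i < j ∧ j < cs.length ∧ cs[i]? = some '>' ∧ cs[j]? = some '<' ∧
      x = (((j - i + 1) / 2 : Nat) : Int) := by
  simp only [listA, List.mem_flatMap, List.mem_range]
  constructor
  · rintro ⟨i, hi, hmem⟩
    by_cases hgt : cs[i]? = some '>'
    · rw [if_pos hgt] at hmem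
      simp only [List.mem_map, List.mem_filter, List.mem_range, decide_eq_true_eq] at hmem
      obtain ⟨k, ⟨hk, hlt⟩, rfl⟩ := hmem
      refine ⟨i, i + 1 + k, by omega, by omega, hgt, hlt, ?_⟩
      congr 1
      omega
    · rw [if_neg hgt] at hmem
      cases hmem
  · rintro ⟨i, j, hij, hj, hgt, hlt, rfl⟩
    refine ⟨i, by omega, ?_⟩
    rw [if_pos hgt]
    simp only [List.mem_map, List.mem_filter, List.mem_range, decide_eq_true_eq]
    refine ⟨j - i - 1, ⟨by omega, by rw [show i + 1 + (j - i - 1) = j by omega]; exact hlt⟩, ?_⟩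
    congr 1
    omega

-- A's port computes the min of listA
theorem contact_eq_listA (hallway : String) :
    contact hallway = (match (listA hallway.toList).min? with
      | some m => m | none => (-1 : Int)) := by
  simp only [contact]
  rw [A_fold hallway.toList, foldl_omin_none]

-- B's port computes the min of gapB none
theorem contact_alt_eq_gapB (hallway : String) :
    contact_alt hallway = (match (gapB none hallway.toList).min? with
      | some m => m | none => (-1 : Int)) := by
  simp only [contact_alt]
  rw [B_fold hallway.toList 0 none none none (Or.inl ⟨rfl, rfl⟩), foldl_omin_none]

-- completeness: every A pair is dominated by the value recorded at that '<' (carried-gap form)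
theorem gapB_dom_carry (cs : List Char) (d : Nat) (j : Nat) (hj : j < cs.length)
    (hlt : cs[j]? = some '<') :
    ∃ x ∈ gapB (some d) cs, x ≤ (((j + d + 1) / 2 : Nat) : Int) := by
  induction cs generalizing d j with
  | nil => simp at hj
  | cons c cs ih =>
    cases j with
    | zero =>
      have hc : c = '<' := by simpa using hlt
      subst hc
      rw [gapB_lt_some]
      exact ⟨_, List.mem_cons_self, by simp⟩
    | succ j =>
      have hj' : j < cs.length := by simpa using hj
      have hlt' : cs[j]? = some '<' := by simpa using hlt
      by_cases hc : c = '>'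
      · subst hc
        rw [gapB_gt]
        obtain ⟨x, hx, hle⟩ := ih 1 j hj' hlt'
        exact ⟨x, hx, le_trans hle (cast_div2_mono (by omega))⟩
      · by_cases hc2 : c = '<'
        · subst hc2
          rw [gapB_lt_some]
          obtain ⟨x, hx, hle⟩ := ih (d + 1) j hj' hlt'
          exact ⟨x, List.mem_cons_of_mem _ hx, le_trans hle (cast_div2_mono (by omega))⟩
        · rw [gapB_other _ _ _ hc hc2]
          obtain ⟨x, hx, hle⟩ := ih (d + 1) j hj' hlt'
          exact ⟨x, hx, le_trans hle (cast_div2_mono (by omega))⟩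

theorem gapB_dom (cs : List Char) (g : Option Nat) (i j : Nat) (hij : i < j)
    (hj : j < cs.length) (hgt : cs[i]? = some '>') (hlt : cs[j]? = some '<') :
    ∃ x ∈ gapB g cs, x ≤ (((j - i + 1) / 2 : Nat) : Int) := by
  induction cs generalizing g i j with
  | nil => simp at hj
  | cons c cs ih =>
    cases i with
    | zero =>
      have hc : c = '>' := by simpa using hgt
      subst hc
      rw [gapB_gt]
      obtain ⟨j', rfl⟩ : ∃ j', j = j' + 1 := ⟨j - 1, by omega⟩
      have hj' : j' < cs.length := by simpa using hj
      have hlt' : cs[j']? = some '<' := by simpa using hlt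
      obtain ⟨x, hx, hle⟩ := gapB_dom_carry cs 1 j' hj' hlt'
      exact ⟨x, hx, le_trans hle (cast_div2_mono (by omega))⟩
    | succ i =>
      obtain ⟨j', rfl⟩ : ∃ j', j = j' + 1 := ⟨j - 1, by omega⟩
      have hij' : i < j' := by omega
      have hj' : j' < cs.length := by simpa using hj
      have hgt' : cs[i]? = some '>' := by simpa using hgt
      have hlt' : cs[j']? = some '<' := by simpa using hlt
      have harith : j' + 1 - (i + 1) + 1 = j' - i + 1 := by omega
      by_cases hc : c = '>'
      · subst hc
        rw [gapB_gt, harith]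
        exact ih (some 1) i j' hij' hj' hgt' hlt'
      · by_cases hc2 : c = '<'
        · subst hc2
          rw [harith]
          cases g with
          | none =>
            rw [gapB_lt_none]
            exact ih none i j' hij' hj' hgt' hlt'
          | some d =>
            rw [gapB_lt_some]
            obtain ⟨x, hx, hle⟩ := ih (some (d + 1)) i j' hij' hj' hgt' hlt'
            exact ⟨x, List.mem_cons_of_mem _ hx, hle⟩
        · rw [gapB_other _ _ _ hc hc2, harith]
          exact ih _ i j' hij' hj' hgt' hlt'

-- soundness: every B candidate is an A pair value (or stems from the carried gap)
theorem gapB_sound (cs : List Char) (g : Option Nat) (x : Int) (hx : x ∈ gapB g cs) :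
    (∃ i j, i < j ∧ j < cs.length ∧ cs[i]? = some '>' ∧ cs[j]? = some '<' ∧
        x = (((j - i + 1) / 2 : Nat) : Int)) ∨
    (∃ d j, g = some d ∧ j < cs.length ∧ cs[j]? = some '<' ∧
        x = (((j + d + 1) / 2 : Nat) : Int)) := by
  induction cs generalizing g with
  | nil => simp [gapB] at hx
  | cons c cs ih =>
    by_cases hc : c = '>'
    · subst hc
      rw [gapB_gt] at hx
      rcases ih (some 1) hx with ⟨i, j, hij, hj, hgt, hlt, rfl⟩ | ⟨d, j, hd, hj, hlt, rfl⟩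
      · exact Or.inl ⟨i + 1, j + 1, by omega, by simpa using hj, by simpa using hgt,
          by simpa using hlt, by congr 1; omega⟩
      · obtain rfl : d = 1 := by injection hd with h; omega
        exact Or.inl ⟨0, j + 1, by omega, by simpa using hj, by simp,
          by simpa using hlt, by norm_num⟩
    · by_cases hc2 : c = '<'
      · subst hc2
        cases g with
        | none =>
          rw [gapB_lt_none] at hx
          rcases ih none hx with ⟨i, j, hij, hj, hgt, hlt, rfl⟩ | ⟨d, j, hd, _, _, _⟩
          · exact Or.inl ⟨i + 1, j + 1, by omega, by simpa using hj, by simpa using hgt,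
              by simpa using hlt, by congr 1; omega⟩
          · cases hd
        | some d =>
          rw [gapB_lt_some] at hx
          rcases List.mem_cons.mp hx with rfl | hx'
          · exact Or.inr ⟨d, 0, rfl, by simp, by simp, by congr 1; omega⟩
          · rcases ih (some (d + 1)) hx' with ⟨i, j, hij, hj, hgt, hlt, rfl⟩ | ⟨d', j, hd', hj, hlt, rfl⟩
            · exact Or.inl ⟨i + 1, j + 1, by omega, by simpa using hj, by simpa using hgt,
                by simpa using hlt, by congr 1; omega⟩
            · obtain rfl : d' = d + 1 := by injection hd' with h; omega
              exact Or.inr ⟨d, j + 1, rfl, by simpa using hj, by simpa using hlt,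
                by congr 1; omega⟩
      · rw [gapB_other _ _ _ hc hc2] at hx
        cases g with
        | none =>
          rcases ih none hx with ⟨i, j, hij, hj, hgt, hlt, rfl⟩ | ⟨d, j, hd, _, _, _⟩
          · exact Or.inl ⟨i + 1, j + 1, by omega, by simpa using hj, by simpa using hgt,
              by simpa using hlt, by congr 1; omega⟩
          · cases hd
        | some d =>
          rcases ih (some (d + 1)) hx with ⟨i, j, hij, hj, hgt, hlt, rfl⟩ | ⟨d', j, hd', hj, hlt, rfl⟩
          · exact Or.inl ⟨i + 1, j + 1, by omega, by simpa using hj, by simpa using hgt,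
              by simpa using hlt, by congr 1; omega⟩
          · obtain rfl : d' = d + 1 := by injection hd' with h; omega
            exact Or.inr ⟨d, j + 1, rfl, by simpa using hj, by simpa using hlt,
              by congr 1; omega⟩

theorem min?_eq_of_dom (A B : List Int) (h1 : ∀ a ∈ A, ∃ b ∈ B, b ≤ a)
    (h2 : ∀ b ∈ B, ∃ a ∈ A, a ≤ b) : A.min? = B.min? := by
  cases hA : A.min? with
  | none =>
    cases hB : B.min? with
    | none => rfl
    | some b =>
      have hb := List.min?_mem hB
      obtain ⟨a, ha, _⟩ := h2 b hb
      rw [List.min?_eq_none_iff] at hA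
      simp [hA] at ha
  | some a =>
    have hmem := (List.min?_eq_some_iff.mp hA).1
    have hle := (List.min?_eq_some_iff.mp hA).2
    obtain ⟨b, hb, hba⟩ := h1 a hmem
    cases hB : B.min? with
    | none => rw [List.min?_eq_none_iff] at hB; simp [hB] at hb
    | some bm =>
      have hbmem := (List.min?_eq_some_iff.mp hB).1
      have hble := (List.min?_eq_some_iff.mp hB).2
      obtain ⟨a', ha', ha'b⟩ := h2 bm hbmem
      have : a = bm := le_antisymm (le_trans (hle a' ha') ha'b) (le_trans (hble b hb) hba)
      rw [this]

theorem minA_eq_minB (cs : List Char) : (listA cs).min? = (gapB none cs).min? := by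
  apply min?_eq_of_dom
  · intro a ha
    obtain ⟨i, j, hij, hj, hgt, hlt, rfl⟩ := mem_listA.mp ha
    exact gapB_dom cs none i j hij hj hgt hlt
  · intro b hb
    rcases gapB_sound cs none b hb with ⟨i, j, hij, hj, hgt, hlt, rfl⟩ | ⟨d, _, h, _⟩
    · exact ⟨_, mem_listA.mpr ⟨i, j, hij, hj, hgt, hlt, rfl⟩, le_refl _⟩
    · cases h

-- ===== VERDICT (by name: the statement is the Claim_ definition above) =====
theorem contact_spec : Claim_equal_contact := by
  intro hallway _
  unfold Spec_contact
  rw [contact_eq_listA, contact_alt_eq_gapB, minA_eq_minB]
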